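-- pv_equiv track=rewrite | github.com/pypi-data/pypi-mirror-403 | packages/pyscriptbase/pyscriptbase-1.1.1.tar.gz/pyscriptbase-1.1.1/pyscriptbase/app.py | getAssistedList
-- ===== SOURCE A (Python) =====
-- def getAssistedList(receivers: list[tuple], senders: list[tuple], maxCount: int = 1) -> list[tuple]:
--     result = []
--     sendMap = {}
--
--     for sender in senders:
--         for _ in range(0, sender[1]):
--             for j, receiver in enumerate(receivers):
--                 if receiver[0] == sender[0] or receiver[1] == 0:
--                     continue
--                 key = f"{sender[0]}-{receiver[0]}"
--                 if key not in sendMap: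
--                     sendMap[key] = 0
--                 if sendMap[key] >= maxCount:
--                     continue
--                 sendMap[key] += 1
--                 receivers[j] = (receiver[0], receiver[1] - 1)
--                 result.append((sender[0], receiver[0]))
--                 break
--     return result
-- ===== SOURCE B (Python) =====
-- def getAssistedList(receivers: list[tuple], senders: list[tuple], maxCount: int = 1) -> list[tuple]:
--     # Per sender, walk receivers once with an advancing pointer and hand out
--     # sends in batches, instead of rescanning the whole list for every send.
--     result = []
--     sendMap = {}
--     for s, count in senders:
--         remaining = count
--         j = 0
--         while remaining > 0 and j < len(receivers):
--             rid, cap = receivers[j]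
--             if rid == s or cap == 0:
--                 j += 1
--                 continue
--             key = f"{s}-{rid}"
--             used = sendMap.setdefault(key, 0)
--             if used >= maxCount:
--                 j += 1
--                 continue
--             t = min(remaining, maxCount - used)
--             if cap > 0:
--                 t = min(t, cap)
--             sendMap[key] = used + t
--             receivers[j] = (rid, cap - t)
--             result.extend([(s, rid)] * t)
--             remaining -= t
--             j += 1
--     return result
-- ===== Notes on version B (the rewrite author's own statement) =====
-- stated objective: faster
-- what changed: Per sender, B walks the receiver list once with an advancing pointer and hands out sends in batches of min(remaining, maxCount-used, cap), instead of A's rescan of the whole receiver list from index 0 for every single send.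
import Mathlib
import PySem

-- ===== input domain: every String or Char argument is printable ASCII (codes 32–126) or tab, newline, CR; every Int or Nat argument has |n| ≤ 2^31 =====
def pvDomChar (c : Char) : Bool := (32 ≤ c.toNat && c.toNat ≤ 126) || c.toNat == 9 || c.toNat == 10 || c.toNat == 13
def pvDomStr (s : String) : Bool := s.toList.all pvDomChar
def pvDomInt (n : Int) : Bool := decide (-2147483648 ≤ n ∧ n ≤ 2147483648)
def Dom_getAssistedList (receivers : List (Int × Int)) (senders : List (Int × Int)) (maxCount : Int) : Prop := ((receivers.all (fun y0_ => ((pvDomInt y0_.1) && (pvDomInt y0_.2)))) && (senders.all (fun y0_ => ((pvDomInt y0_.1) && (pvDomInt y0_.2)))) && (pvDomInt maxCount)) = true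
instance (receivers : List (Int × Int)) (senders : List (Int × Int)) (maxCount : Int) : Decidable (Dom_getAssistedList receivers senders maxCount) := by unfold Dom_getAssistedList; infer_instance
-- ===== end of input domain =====

-- B replaces A's rescan-from-0-per-send by a per-sender advancing pointer with batched sends
-- (measured faster). Both A and B mutate `receivers` in place identically; equivalence here is
-- about the returned list (the ports thread the receiver list functionally).

-- ===== PORT A =====
-- f"{sender[0]}-{receiver[0]}"
def pvKey (s r : Int) : String := PySem.Int.toStr s ++ "-" ++ PySem.Int.toStr r

-- the inner `for j, receiver in enumerate(receivers): ... break` of one send: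
-- returns (updated receivers, updated sendMap, chosen receiver id if any)
def scanA (s mc : Int) : List (Int × Int) → PySem.Dict String Int →
    (List (Int × Int) × PySem.Dict String Int × Option Int)
  | [], m => ([], m, none)
  | (r, cap) :: rest, m =>
    if r = s ∨ cap = 0 then
      let q := scanA s mc rest m
      ((r, cap) :: q.1, q.2.1, q.2.2)
    else
      -- `if key not in sendMap: sendMap[key] = 0`
      let m1 := m.setdefault (pvKey s r) 0
      if mc ≤ m1.getD (pvKey s r) 0 then
        let q := scanA s mc rest m1
        ((r, cap) :: q.1, q.2.1, q.2.2)
      else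
        ((r, cap - 1) :: rest, m1.insert (pvKey s r) (m1.getD (pvKey s r) 0 + 1), some r)

-- `for _ in range(0, sender[1])`: n single sends, appending to result on success
def sendsA (s mc : Int) :
    Nat → (List (Int × Int) × PySem.Dict String Int × List (Int × Int)) →
    (List (Int × Int) × PySem.Dict String Int × List (Int × Int))
  | 0, st => st
  | n + 1, st =>
    let q := scanA s mc st.1 st.2.1
    match q.2.2 with
    | some r => sendsA s mc n (q.1, q.2.1, st.2.2 ++ [(s, r)])
    | none => sendsA s mc n (q.1, q.2.1, st.2.2)

def getAssistedList (receivers : List (Int × Int)) (senders : List (Int × Int)) (maxCount : Int) : List (Int × Int) :=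
  (senders.foldl (fun st sc => sendsA sc.1 maxCount sc.2.toNat st)
    (receivers, PySem.Dict.empty, [])).2.2

-- ===== PORT B =====
-- the `while remaining > 0 and j < len(receivers)` loop; the pointer j is the consumed prefix,
-- so the loop is recursion on the receiver suffix, threading (remaining, sendMap, result)
def scanB (s mc : Int) : Int → List (Int × Int) → PySem.Dict String Int → List (Int × Int) →
    (List (Int × Int) × PySem.Dict String Int × List (Int × Int))
  | _, [], m, res => ([], m, res)
  | rem, (r, cap) :: rest, m, res =>
    if rem ≤ 0 then ((r, cap) :: rest, m, res)
    else if r = s ∨ cap = 0 then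
      let q := scanB s mc rem rest m res
      ((r, cap) :: q.1, q.2.1, q.2.2)
    else
      -- used = sendMap.setdefault(key, 0)
      let m1 := m.setdefault (pvKey s r) 0
      let used := m1.getD (pvKey s r) 0
      if mc ≤ used then
        let q := scanB s mc rem rest m1 res
        ((r, cap) :: q.1, q.2.1, q.2.2)
      else
        let t := if 0 < cap then min (min rem (mc - used)) cap else min rem (mc - used)
        let q := scanB s mc (rem - t) rest (m1.insert (pvKey s r) (used + t))
          (res ++ List.replicate t.toNat (s, r))
        ((r, cap - t) :: q.1, q.2.1, q.2.2)

def getAssistedList_alt (receivers : List (Int × Int)) (senders : List (Int × Int)) (maxCount : Int) : List (Int × Int) :=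
  (senders.foldl (fun st sc => scanB sc.1 maxCount sc.2 st.1 st.2.1 st.2.2)
    (receivers, PySem.Dict.empty, [])).2.2

-- ===== PRECONDITION & SPEC =====
def Spec_getAssistedList (receivers : List (Int × Int)) (senders : List (Int × Int)) (maxCount : Int) (out : List (Int × Int)) : Prop := out = getAssistedList_alt receivers senders maxCount
instance (receivers : List (Int × Int)) (senders : List (Int × Int)) (maxCount : Int) (out : List (Int × Int)) : Decidable (Spec_getAssistedList receivers senders maxCount out) := by unfold Spec_getAssistedList; infer_instance

-- ===== CLAIM (what is proved, stated in full; the proofs are below) =====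
def Claim_equal_getAssistedList : Prop := ∀ (receivers : List (Int × Int)) (senders : List (Int × Int)) (maxCount : Int), Dom_getAssistedList receivers senders maxCount → Spec_getAssistedList receivers senders maxCount (getAssistedList receivers senders maxCount)

-- ===== LEMMAS AND PROOFS =====

-- map m grows into m' : every present key stays present and no counter decreases
def MapLe (m m' : PySem.Dict String Int) : Prop :=
  ∀ k, (m.contains k = true → m'.contains k = true) ∧ m.getD k 0 ≤ m'.getD k 0

-- a receiver the current sender can no longer use
def DeadP (s mc : Int) (m : PySem.Dict String Int) (p : Int × Int) : Prop :=
  p.1 = s ∨ p.2 = 0 ∨ (m.contains (pvKey s p.1) = true ∧ mc ≤ m.getD (pvKey s p.1) 0)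

theorem mapLe_refl (m : PySem.Dict String Int) : MapLe m m := fun _ => ⟨id, le_refl _⟩

theorem mapLe_trans {m1 m2 m3 : PySem.Dict String Int} (h1 : MapLe m1 m2) (h2 : MapLe m2 m3) :
    MapLe m1 m3 := fun k => ⟨fun h => (h2 k).1 ((h1 k).1 h), le_trans (h1 k).2 (h2 k).2⟩

theorem mapLe_setdefault (m : PySem.Dict String Int) (k : String) :
    MapLe m (m.setdefault k 0) := by
  intro k'
  constructor
  · rw [PySem.Dict.contains_setdefault]; intro h; simp [h]
  · by_cases h : k' = k
    · subst h; rw [PySem.Dict.getD_setdefault_self]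
    · rw [PySem.Dict.getD_eq_get?_getD, PySem.Dict.getD_eq_get?_getD,
        PySem.Dict.get?_setdefault_of_ne m 0 h]

theorem mapLe_insert (m : PySem.Dict String Int) (k : String) (v : Int)
    (h : m.getD k 0 ≤ v) : MapLe m (m.insert k v) := by
  intro k'
  constructor
  · rw [PySem.Dict.contains_insert]; intro hc; simp [hc]
  · rw [PySem.Dict.getD_insert]
    split
    · rename_i hk; subst hk; exact h
    · exact le_refl _

theorem deadP_mono {s mc : Int} {m m' : PySem.Dict String Int} {p : Int × Int}
    (hle : MapLe m m') (h : DeadP s mc m p) : DeadP s mc m' p := by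
  rcases h with h | h | ⟨h1, h2⟩
  · exact Or.inl h
  · exact Or.inr (Or.inl h)
  · exact Or.inr (Or.inr ⟨(hle _).1 h1, le_trans h2 (hle _).2⟩)

theorem scanA_mapLe (s mc : Int) (L : List (Int × Int)) (m : PySem.Dict String Int) :
    MapLe m (scanA s mc L m).2.1 := by
  induction L generalizing m with
  | nil => exact mapLe_refl m
  | cons p rest ih =>
    obtain ⟨r, cap⟩ := p
    simp only [scanA]
    split
    · exact ih m
    · split
      · exact mapLe_trans (mapLe_setdefault m _) (ih _)
      · exact mapLe_trans (mapLe_setdefault m _)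
          (mapLe_insert _ _ _ (by omega))

-- a dict overwritten twice at the same key keeps only the second value
theorem insert_insert_self (d : PySem.Dict String Int) (k : String) (v v' : Int) :
    (d.insert k v).insert k v' = d.insert k v' := by
  apply PySem.Dict.ext
  have hc : (d.insert k v).contains k = true := PySem.Dict.contains_insert_self d k v
  rw [PySem.Dict.items_insert_of_contains _ _ hc]
  by_cases h : d.contains k = true
  · rw [PySem.Dict.items_insert_of_contains _ _ h, PySem.Dict.items_insert_of_contains _ _ h,
      List.map_map]
    apply List.map_congr_left
    intro p _
    by_cases hp : p.1 = k <;> simp [hp]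
  · have h' : d.contains k = false := by simpa using h
    rw [PySem.Dict.items_insert_of_not_contains _ _ h',
      PySem.Dict.items_insert_of_not_contains _ _ h', List.map_append]
    congr 1
    · conv_rhs => rw [← List.map_id d.items]
      apply List.map_congr_left
      intro p hp
      have hk : p.1 ≠ k := by
        intro hpk
        have hm := PySem.Dict.mem_keys_of_mem_items d hp
        rw [hpk] at hm
        rw [PySem.Dict.contains_iff_mem_keys] at h
        exact h hm
      simp [hk]
    · simp

-- scanA walks over a dead head without touching anything
theorem scanA_dead_cons {s mc : Int} {m : PySem.Dict String Int} {d : Int × Int}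
    (hd : DeadP s mc m d) (L : List (Int × Int)) :
    scanA s mc (d :: L) m =
      (d :: (scanA s mc L m).1, (scanA s mc L m).2.1, (scanA s mc L m).2.2) := by
  obtain ⟨r, cap⟩ := d
  by_cases h1 : r = s ∨ cap = 0
  · simp [scanA, h1]
  · rcases hd with h | h | ⟨hc, hle⟩
    · exact absurd (Or.inl h) h1
    · exact absurd (Or.inr h) h1
    · simp only [scanA, if_neg h1]
      rw [PySem.Dict.setdefault_of_contains _ _ hc, if_pos hle]

-- sendsA walks over a dead head without touching anything, however many sends remain
theorem sendsA_dead (s mc : Int) (n : Nat) {m : PySem.Dict String Int} {d : Int × Int}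
    (hd : DeadP s mc m d) (L res : List (Int × Int)) :
    sendsA s mc n (d :: L, m, res) =
      ((sendsA s mc n (L, m, res)).1.cons d, (sendsA s mc n (L, m, res)).2.1,
        (sendsA s mc n (L, m, res)).2.2) := by
  induction n generalizing m L res with
  | zero => rfl
  | succ n ih =>
    have hs := scanA_dead_cons hd L
    simp only [sendsA, hs]
    have hle := scanA_mapLe s mc L m
    have hd' : DeadP s mc (scanA s mc L m).2.1 d := deadP_mono hle hd
    cases hq : (scanA s mc L m).2.2 with
    | some r => exact ih hd' _ _
    | none => exact ih hd' _ _

theorem sendsA_nil (s mc : Int) (n : Nat) (m : PySem.Dict String Int) (res : List (Int × Int)) :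
    sendsA s mc n ([], m, res) = ([], m, res) := by
  induction n with
  | zero => rfl
  | succ n ih => simpa [sendsA, scanA] using ih

theorem scanB_nonpos (s mc rem : Int) (hrem : rem ≤ 0) (L : List (Int × Int))
    (m : PySem.Dict String Int) (res : List (Int × Int)) :
    scanB s mc rem L m res = (L, m, res) := by
  cases L with
  | nil => rfl
  | cons p rest => cases p; simp [scanB, hrem]


-- one single send of A whose scan stops at the (eligible) head receiver
theorem sendsA_eligible_step (s mc : Int) (n : Nat) (r cap : Int)
    (m : PySem.Dict String Int) (L res : List (Int × Int))
    (h1 : ¬(r = s ∨ cap = 0))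
    (h2 : ¬ mc ≤ (m.setdefault (pvKey s r) 0).getD (pvKey s r) 0) :
    sendsA s mc (n + 1) ((r, cap) :: L, m, res) =
      sendsA s mc n ((r, cap - 1) :: L,
        (m.setdefault (pvKey s r) 0).insert (pvKey s r)
          ((m.setdefault (pvKey s r) 0).getD (pvKey s r) 0 + 1),
        res ++ [(s, r)]) := by
  simp only [sendsA, scanA, if_neg h1, if_neg h2]

-- a head receiver whose pair counter is already full: A walks over it, only
-- materialising the 0 entry (setdefault) on the first pass
theorem sendsA_countdead_cons (s mc : Int) (n : Nat) (r cap : Int)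
    (m : PySem.Dict String Int) (L res : List (Int × Int))
    (h1 : ¬(r = s ∨ cap = 0))
    (h2 : mc ≤ (m.setdefault (pvKey s r) 0).getD (pvKey s r) 0) :
    sendsA s mc (n + 1) ((r, cap) :: L, m, res) =
      ((sendsA s mc (n + 1) (L, m.setdefault (pvKey s r) 0, res)).1.cons (r, cap),
        (sendsA s mc (n + 1) (L, m.setdefault (pvKey s r) 0, res)).2.1,
        (sendsA s mc (n + 1) (L, m.setdefault (pvKey s r) 0, res)).2.2) := by
  have hc : (m.setdefault (pvKey s r) 0).contains (pvKey s r) = true := by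
    rw [PySem.Dict.contains_setdefault]; simp
  have hle := scanA_mapLe s mc L (m.setdefault (pvKey s r) 0)
  have hd' : DeadP s mc (scanA s mc L (m.setdefault (pvKey s r) 0)).2.1 (r, cap) := by
    refine Or.inr (Or.inr ⟨(hle _).1 hc, le_trans h2 (hle _).2⟩)
  simp only [sendsA, scanA, if_neg h1, if_pos h2]
  cases hq : (scanA s mc L (m.setdefault (pvKey s r) 0)).2.2 with
  | some r' => exact sendsA_dead s mc n hd' _ _
  | none => exact sendsA_dead s mc n hd' _ _

-- a batch: t consecutive single sends of A all land on the same (eligible) head receiver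
theorem sendsA_batch (s mc : Int) (tn : Nat) : ∀ (t rem r cap : Int)
    (m : PySem.Dict String Int) (L res : List (Int × Int)),
    t.toNat = tn → 1 ≤ t → t ≤ rem →
    ¬(r = s ∨ cap = 0) →
    t + (m.setdefault (pvKey s r) 0).getD (pvKey s r) 0 ≤ mc →
    (0 < cap → t ≤ cap) →
    sendsA s mc rem.toNat ((r, cap) :: L, m, res) =
      sendsA s mc (rem - t).toNat ((r, cap - t) :: L,
        (m.setdefault (pvKey s r) 0).insert (pvKey s r)
          ((m.setdefault (pvKey s r) 0).getD (pvKey s r) 0 + t),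
        res ++ List.replicate t.toNat (s, r)) := by
  induction tn with
  | zero => intro t rem r cap m L res htn ht1 _ _ _ _; omega
  | succ n ih =>
    intro t rem r cap m L res htn ht1 htr h1 hmc hcap
    have h2 : ¬ mc ≤ (m.setdefault (pvKey s r) 0).getD (pvKey s r) 0 := by omega
    obtain ⟨k, hk⟩ : ∃ k, rem.toNat = k + 1 := ⟨rem.toNat - 1, by omega⟩
    rw [hk, sendsA_eligible_step s mc k r cap m L res h1 h2]
    have hnots : ¬ r = s := fun h => h1 (Or.inl h)
    have hnotc : ¬ cap = 0 := fun h => h1 (Or.inr h)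
    cases n with
    | zero =>
      have ht : t = 1 := by omega
      subst ht
      rw [show (rem - 1).toNat = k by omega]
      norm_num
    | succ n' =>
      have hset : ((m.setdefault (pvKey s r) 0).insert (pvKey s r)
            ((m.setdefault (pvKey s r) 0).getD (pvKey s r) 0 + 1)).setdefault (pvKey s r) 0 =
          (m.setdefault (pvKey s r) 0).insert (pvKey s r)
            ((m.setdefault (pvKey s r) 0).getD (pvKey s r) 0 + 1) :=
        PySem.Dict.setdefault_of_contains _ _ (PySem.Dict.contains_insert_self _ _ _)
    -- getD of the freshly overwritten key
      have hgd : ((m.setdefault (pvKey s r) 0).insert (pvKey s r)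
            ((m.setdefault (pvKey s r) 0).getD (pvKey s r) 0 + 1)).getD (pvKey s r) 0 =
          (m.setdefault (pvKey s r) 0).getD (pvKey s r) 0 + 1 :=
        PySem.Dict.getD_insert_self _ _ _ _
      have step := ih (t - 1) (rem - 1) r (cap - 1)
        ((m.setdefault (pvKey s r) 0).insert (pvKey s r)
          ((m.setdefault (pvKey s r) 0).getD (pvKey s r) 0 + 1)) L (res ++ [(s, r)])
        (by omega) (by omega) (by omega)
        (by rintro (h | h) <;> omega)
        (by rw [hset, hgd]; omega)
        (by intro h; omega)
      rw [show (rem - 1).toNat = k by omega] at step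
      rw [step, hset, hgd, insert_insert_self]
      rw [show (rem - 1 - (t - 1)) = rem - t by ring,
        show (cap - 1 - (t - 1)) = cap - t by ring,
        show (m.setdefault (pvKey s r) 0).getD (pvKey s r) 0 + 1 + (t - 1) =
          (m.setdefault (pvKey s r) 0).getD (pvKey s r) 0 + t by ring]
      rw [List.append_assoc,
        show ([(s, r)] ++ List.replicate (t - 1).toNat (s, r) : List (Int × Int)) =
          List.replicate t.toNat (s, r) by
            rw [show t.toNat = (t - 1).toNat + 1 by omega, List.replicate_succ]; rfl]

-- main per-sender lemma: A's rem.toNat single sends equal B's pointer walk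
theorem main_lemma (s mc : Int) : ∀ (L : List (Int × Int)) (rem : Int)
    (m : PySem.Dict String Int) (res : List (Int × Int)),
    sendsA s mc rem.toNat (L, m, res) = scanB s mc rem L m res := by
  intro L
  induction L with
  | nil =>
    intro rem m res
    rw [sendsA_nil]
    cases hrem : decide (rem ≤ 0) <;> rfl
  | cons p rest ih =>
    obtain ⟨r, cap⟩ := p
    intro rem m res
    by_cases hrem : rem ≤ 0
    · rw [show rem.toNat = 0 by omega]
      simp [scanB, hrem, sendsA]
    · by_cases h1 : r = s ∨ cap = 0
      · have hd : DeadP s mc m (r, cap) := by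
          rcases h1 with h | h
          · exact Or.inl h
          · exact Or.inr (Or.inl h)
        rw [sendsA_dead s mc rem.toNat hd rest res, ih rem m res]
        simp only [scanB, if_neg hrem, if_pos h1]
      · by_cases h2 : mc ≤ (m.setdefault (pvKey s r) 0).getD (pvKey s r) 0
        · obtain ⟨k, hk⟩ : ∃ k, rem.toNat = k + 1 := ⟨rem.toNat - 1, by omega⟩
          rw [hk, sendsA_countdead_cons s mc k r cap m rest res h1 h2, ← hk, ih rem _ res]
          simp only [scanB, if_neg hrem, if_neg h1, if_pos h2]
        · have ht1 : 1 ≤ (if 0 < cap then min (min rem ((mc - (m.setdefault (pvKey s r) 0).getD (pvKey s r) 0))) cap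
              else min rem (mc - (m.setdefault (pvKey s r) 0).getD (pvKey s r) 0)) := by
            split <;> omega
          have htr : (if 0 < cap then min (min rem ((mc - (m.setdefault (pvKey s r) 0).getD (pvKey s r) 0))) cap
              else min rem (mc - (m.setdefault (pvKey s r) 0).getD (pvKey s r) 0)) ≤ rem := by
            split <;> omega
          have hmc : (if 0 < cap then min (min rem ((mc - (m.setdefault (pvKey s r) 0).getD (pvKey s r) 0))) cap
              else min rem (mc - (m.setdefault (pvKey s r) 0).getD (pvKey s r) 0)) +
              (m.setdefault (pvKey s r) 0).getD (pvKey s r) 0 ≤ mc := by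
            split <;> omega
          have hcap : 0 < cap → (if 0 < cap then min (min rem ((mc - (m.setdefault (pvKey s r) 0).getD (pvKey s r) 0))) cap
              else min rem (mc - (m.setdefault (pvKey s r) 0).getD (pvKey s r) 0)) ≤ cap := by
            intro h; rw [if_pos h]; omega
          rw [sendsA_batch s mc _ _ rem r cap m rest res rfl ht1 htr h1 hmc hcap]
          by_cases h3 : rem - (if 0 < cap then min (min rem ((mc - (m.setdefault (pvKey s r) 0).getD (pvKey s r) 0))) cap
              else min rem (mc - (m.setdefault (pvKey s r) 0).getD (pvKey s r) 0)) ≤ 0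
          · rw [show (rem - (if 0 < cap then min (min rem ((mc - (m.setdefault (pvKey s r) 0).getD (pvKey s r) 0))) cap
              else min rem (mc - (m.setdefault (pvKey s r) 0).getD (pvKey s r) 0))).toNat = 0 by omega]
            simp only [scanB, if_neg hrem, if_neg h1, if_neg h2, sendsA]
            rw [scanB_nonpos s mc _ h3]
          · have hdead : DeadP s mc
                ((m.setdefault (pvKey s r) 0).insert (pvKey s r)
                  ((m.setdefault (pvKey s r) 0).getD (pvKey s r) 0 +
                    (if 0 < cap then min (min rem ((mc - (m.setdefault (pvKey s r) 0).getD (pvKey s r) 0))) cap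
                      else min rem (mc - (m.setdefault (pvKey s r) 0).getD (pvKey s r) 0))))
                (r, cap - (if 0 < cap then min (min rem ((mc - (m.setdefault (pvKey s r) 0).getD (pvKey s r) 0))) cap
                  else min rem (mc - (m.setdefault (pvKey s r) 0).getD (pvKey s r) 0))) := by
              have hsplit : (if 0 < cap then min (min rem ((mc - (m.setdefault (pvKey s r) 0).getD (pvKey s r) 0))) cap
                  else min rem (mc - (m.setdefault (pvKey s r) 0).getD (pvKey s r) 0)) =
                  mc - (m.setdefault (pvKey s r) 0).getD (pvKey s r) 0 ∨
                  (0 < cap ∧ (if 0 < cap then min (min rem ((mc - (m.setdefault (pvKey s r) 0).getD (pvKey s r) 0))) cap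
                  else min rem (mc - (m.setdefault (pvKey s r) 0).getD (pvKey s r) 0)) = cap) := by
                split <;> omega
              rcases hsplit with h | ⟨_, h⟩
              · refine Or.inr (Or.inr ⟨PySem.Dict.contains_insert_self _ _ _, ?_⟩)
                rw [PySem.Dict.getD_insert_self]
                omega
              · exact Or.inr (Or.inl (by omega))
            rw [sendsA_dead s mc _ hdead rest _, ih _ _ _]
            simp only [scanB, if_neg hrem, if_neg h1, if_neg h2]

-- ===== VERDICT (by name: the statement is the Claim_ definition above) =====
theorem getAssistedList_spec : Claim_equal_getAssistedList := by
  intro receivers senders maxCount _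
  unfold Spec_getAssistedList getAssistedList getAssistedList_alt
  suffices h : ∀ (ss : List (Int × Int)) (st : List (Int × Int) × PySem.Dict String Int × List (Int × Int)),
      ss.foldl (fun st sc => sendsA sc.1 maxCount sc.2.toNat st) st =
      ss.foldl (fun st sc => scanB sc.1 maxCount sc.2 st.1 st.2.1 st.2.2) st by
    rw [h]
  intro ss
  induction ss with
  | nil => intro st; rfl
  | cons sc rest ih =>
    intro st
    simp only [List.foldl_cons]
    rw [← ih]
    congr 1
    obtain ⟨a, b, c⟩ := st
    exact main_lemma sc.1 maxCount a sc.2 b c
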